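-- pv_equiv track=rewrite | github.com/myejin/ALGO_STUDY_123 | 파싱/이영준/13022.py | check_rule_1
-- ===== SOURCE A (Python) =====
-- def check_rule_1(tmp: list) -> bool:
--     l = len(tmp)
--     if l % 4:
--         return False
--     else:
--         wolf = 'wolf'
--         for i in range(4):
--             if tmp[(l//4)*i:(l//4)*(i+1)] != [wolf[i]] * (l // 4):
--                 return False
--     return True
-- ===== SOURCE B (Python) =====
-- def check_rule_1(tmp: list) -> bool:
--     if not tmp:
--         return True
--     runs = []
--     cur = tmp[0]
--     cnt = 1
--     for x in tmp[1:]: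
--         if x == cur:
--             cnt += 1
--         else:
--             runs.append((cur, cnt))
--             cur = x
--             cnt = 1
--     runs.append((cur, cnt))
--     return [k for k, _ in runs] == ['w', 'o', 'l', 'f'] and all(c == runs[0][1] for _, c in runs)
-- ===== Notes on version B (the rewrite author's own statement) =====
-- stated objective: alternative
-- what changed: Replaces A's divisibility test plus four block-slice/replicated-list comparisons with a run-length encoding pass: the list is compressed into (value,count) runs once, then accepted iff the run keys are exactly ['w','o','l','f'] and all run counts are equal (no division or slicing at all).
import Mathlib
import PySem

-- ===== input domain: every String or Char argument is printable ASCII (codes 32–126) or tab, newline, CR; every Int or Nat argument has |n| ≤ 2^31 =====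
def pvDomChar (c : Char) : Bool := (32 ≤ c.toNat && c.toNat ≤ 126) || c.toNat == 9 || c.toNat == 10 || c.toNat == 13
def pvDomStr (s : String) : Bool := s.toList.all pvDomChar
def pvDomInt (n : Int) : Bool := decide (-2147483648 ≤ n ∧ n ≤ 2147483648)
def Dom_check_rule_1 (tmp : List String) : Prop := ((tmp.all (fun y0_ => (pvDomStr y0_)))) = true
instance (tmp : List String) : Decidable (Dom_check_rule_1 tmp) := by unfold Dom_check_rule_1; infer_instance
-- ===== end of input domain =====

-- B replaces A's divisibility-plus-four-slice comparison by a run-length encoding: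
-- compress the list into (value,count) runs, accept iff the keys are exactly w,o,l,f
-- and all counts are equal; objective: alternative algorithm, same cost.

-- ===== PORT A =====
-- A: four slices tmp[(l//4)*i : (l//4)*(i+1)] compared with [wolf[i]] * (l//4);
-- the early-return loop over range(4) is the `all` over List.range 4 (same comparisons, same order).
def check_rule_1 (tmp : List String) : Bool :=
  let l : Int := tmp.length
  if PySem.Int.mod l 4 ≠ 0 then false
  else
    (List.range 4).all (fun i =>
      PySem.List.slice tmp (some (PySem.Int.floordiv l 4 * (i : Int)))
          (some (PySem.Int.floordiv l 4 * ((i : Int) + 1)))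
        == PySem.List.pyRepeat [((PySem.Str.pyGet? "wolf" (i : Int)).map (fun c => String.ofList [c])).getD ""] (PySem.Int.floordiv l 4))

-- ===== PORT B =====
-- B: run-length encode tmp (the loop over tmp[1:] with state (runs, cur, cnt) is the
-- structural recursion rleAux cur cnt, emitting runs at each value change), then
-- check run keys = ['w','o','l','f'] and all counts equal runs[0][1].
def rleAux (cur : String) (cnt : Nat) : List String → List (String × Nat)
  | [] => [(cur, cnt)]
  | x :: xs => if x == cur then rleAux cur (cnt + 1) xs else (cur, cnt) :: rleAux x 1 xs

def check_rule_1_alt (tmp : List String) : Bool :=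
  match tmp with
  | [] => true
  | x :: xs =>
    let runs := rleAux x 1 xs
    (runs.map Prod.fst == ["w", "o", "l", "f"]) &&
      runs.all (fun p => p.2 == (runs.headD ("", 0)).2)

-- ===== PRECONDITION & SPEC =====
def Spec_check_rule_1 (tmp : List String) (out : Bool) : Prop := out = check_rule_1_alt tmp
instance (tmp : List String) (out : Bool) : Decidable (Spec_check_rule_1 tmp out) := by unfold Spec_check_rule_1; infer_instance

-- ===== CLAIM =====
def Claim_equal_check_rule_1 : Prop := ∀ (tmp : List String), Dom_check_rule_1 tmp → Spec_check_rule_1 tmp (check_rule_1 tmp)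

-- ===== LEMMAS AND PROOFS =====

-- the canonical accepted list with block size q
def expectedWolf (q : Nat) : List String :=
  List.replicate q "w" ++ (List.replicate q "o" ++ (List.replicate q "l" ++ List.replicate q "f"))

-- run-length decoding
def decRuns (rs : List (String × Nat)) : List String :=
  rs.flatMap (fun p => List.replicate p.2 p.1)

theorem decRuns_rleAux (xs : List String) : ∀ (cur : String) (cnt : Nat),
    decRuns (rleAux cur cnt xs) = List.replicate cnt cur ++ xs := by
  induction xs with
  | nil => intro cur cnt; simp [rleAux, decRuns]
  | cons x xs ih =>
    intro cur cnt
    by_cases h : x = cur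
    · subst h
      simp only [rleAux, beq_self_eq_true, if_pos, ih]
      rw [List.replicate_succ']
      simp
    · simp only [rleAux, beq_iff_eq, h, if_neg, not_false_iff, decRuns, List.flatMap_cons]
      have := ih x 1
      simp only [decRuns] at this
      simp [this]

theorem rleAux_replicate (m : Nat) : ∀ (cur : String) (cnt : Nat) (rest : List String),
    rleAux cur cnt (List.replicate m cur ++ rest) = rleAux cur (cnt + m) rest := by
  induction m with
  | zero => intro cur cnt rest; simp
  | succ k ih =>
    intro cur cnt rest
    rw [List.replicate_succ, List.cons_append]
    simp only [rleAux, beq_self_eq_true, if_pos]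
    rw [ih]
    congr 1
    omega

theorem rleAux_block {b cur : String} (h : b ≠ cur) (m : Nat) (cnt : Nat) (rest : List String) :
    rleAux cur cnt (List.replicate (m + 1) b ++ rest) = (cur, cnt) :: rleAux b (1 + m) rest := by
  rw [List.replicate_succ, List.cons_append]
  simp only [rleAux, beq_iff_eq, h, if_neg, not_false_iff]
  rw [rleAux_replicate]

-- the letter A indexes out of 'wolf', as a plain list lookup
theorem wolf_letter : ∀ i : Nat, i < 4 →
    ((PySem.Str.pyGet? "wolf" (i : Int)).map (fun c => String.ofList [c])).getD ""
      = ["w", "o", "l", "f"].getD i "" := by decide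

-- B accepts exactly the canonical lists
theorem alt_iff (tmp : List String) :
    check_rule_1_alt tmp = true ↔ ∃ q, tmp = expectedWolf q := by
  constructor
  · intro h
    match htmp : tmp with
    | [] => exact ⟨0, by simp [expectedWolf]⟩
    | x :: xs =>
      simp only [check_rule_1_alt, Bool.and_eq_true, beq_iff_eq, List.all_eq_true] at h
      obtain ⟨hmap, hcnt⟩ := h
      set runs := rleAux x 1 xs with hruns
      match hr : runs with
      | [(k1, c1), (k2, c2), (k3, c3), (k4, c4)] =>
        simp only [List.map_cons, List.map_nil] at hmap
        obtain ⟨h1, h2, h3, h4⟩ : k1 = "w" ∧ k2 = "o" ∧ k3 = "l" ∧ k4 = "f" := by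
          injection hmap with a hmap; injection hmap with b hmap
          injection hmap with c hmap; injection hmap with d
          exact ⟨a, b, c, d⟩
        have e2 := hcnt (k2, c2) (by simp)
        have e3 := hcnt (k3, c3) (by simp)
        have e4 := hcnt (k4, c4) (by simp)
        simp only [List.headD_cons] at e2 e3 e4
        refine ⟨c1, ?_⟩
        have hdec := decRuns_rleAux xs x 1
        rw [← hruns] at hdec
        simp only [List.replicate_one, List.singleton_append] at hdec
        rw [← hdec]
        simp [decRuns, expectedWolf, h1, h2, h3, h4, e2, e3, e4]
      | [] => simp at hmap
      | [_] => simp at hmap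
      | [_, _] => simp at hmap
      | [_, _, _] => simp at hmap
      | _ :: _ :: _ :: _ :: _ :: _ => simp at hmap
  · rintro ⟨q, rfl⟩
    match q with
    | 0 => simp [expectedWolf, check_rule_1_alt]
    | k + 1 =>
      have hexp : expectedWolf (k + 1)
          = "w" :: (List.replicate k "w" ++ (List.replicate (k+1) "o" ++ (List.replicate (k+1) "l" ++ List.replicate (k+1) "f"))) := by
        simp [expectedWolf, List.replicate_succ]
      rw [hexp]
      simp only [check_rule_1_alt]
      have h1 : rleAux "w" 1 (List.replicate k "w" ++ (List.replicate (k+1) "o" ++ (List.replicate (k+1) "l" ++ List.replicate (k+1) "f")))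
          = [("w", 1 + k), ("o", 1 + k), ("l", 1 + k), ("f", 1 + k)] := by
        rw [rleAux_replicate]
        rw [rleAux_block (show ("o" : String) ≠ "w" by decide) k (1 + k)]
        rw [rleAux_block (show ("l" : String) ≠ "o" by decide) k (1 + k)]
        rw [show (List.replicate (k+1) "f" : List String) = List.replicate (k+1) "f" ++ [] by simp]
        rw [rleAux_block (show ("f" : String) ≠ "l" by decide) k (1 + k)]
        simp [rleAux]
      rw [h1]
      simp

-- slices of the canonical list
theorem expected_slice (q : Nat) : ∀ i : Nat, i < 4 →
    ((expectedWolf q).drop (q * i)).take q = List.replicate q (["w", "o", "l", "f"].getD i "") := by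
  intro i hi
  interval_cases i
  · simp only [Nat.mul_zero, List.drop_zero, expectedWolf]
    rw [List.take_left' (by simp)]
    rfl
  · simp only [Nat.mul_one, expectedWolf]
    rw [List.drop_left' (by simp), List.take_left' (by simp)]
    rfl
  · rw [show q * 2 = q + q by ring, ← List.drop_drop]
    simp only [expectedWolf]
    rw [List.drop_left' (by simp), List.drop_left' (by simp), List.take_left' (by simp)]
    rfl
  · rw [show q * 3 = q + q + q by ring, ← List.drop_drop, ← List.drop_drop]
    simp only [expectedWolf]
    rw [List.drop_left' (by simp), List.drop_left' (by simp), List.drop_left' (by simp)]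
    simp

-- A accepts exactly the canonical lists
theorem a_iff (tmp : List String) :
    check_rule_1 tmp = true ↔ ∃ q, tmp = expectedWolf q := by
  have hm : PySem.Int.mod (tmp.length : Int) 4 = ((tmp.length % 4 : Nat) : Int) :=
    PySem.Int.mod_natCast tmp.length 4
  have hd : PySem.Int.floordiv (tmp.length : Int) 4 = ((tmp.length / 4 : Nat) : Int) :=
    PySem.Int.floordiv_natCast tmp.length 4
  constructor
  · intro h
    simp only [check_rule_1] at h
    rw [hm, hd] at h
    by_cases hmod : tmp.length % 4 = 0
    · set q := tmp.length / 4 with hq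
      have hlen : tmp.length = 4 * q := by omega
      rw [hmod] at h
      rw [if_neg (by simp)] at h
      rw [List.all_eq_true] at h
      have hsl : ∀ i : Nat, i < 4 → (tmp.drop (q * i)).take q
          = List.replicate q (["w", "o", "l", "f"].getD i "") := by
        intro i hi
        have hh := h i (List.mem_range.mpr hi)
        rw [show ((q : Nat) : Int) * ((i : Nat) : Int) = ((q * i : Nat) : Int) by push_cast; ring,
            show ((q : Nat) : Int) * (((i : Nat) : Int) + 1) = ((q * i : Nat) : Int) + ((q : Nat) : Int) by push_cast; ring,
            PySem.List.slice_natCast_add, PySem.List.pyRepeat_singleton, wolf_letter i hi] at hh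
        simp only [Int.toNat_natCast, beq_iff_eq] at hh
        exact hh
      have e0 := hsl 0 (by norm_num)
      have e1 := hsl 1 (by norm_num)
      have e2 := hsl 2 (by norm_num)
      have e3 := hsl 3 (by norm_num)
      refine ⟨q, ?_⟩
      have hdecomp : tmp = (tmp.drop (q*0)).take q ++ (((tmp.drop (q*1)).take q) ++ (((tmp.drop (q*2)).take q) ++ (((tmp.drop (q*3)).take q) ++ tmp.drop (q*4)))) := by
        have t1 := List.take_append_drop q tmp
        have t2 := List.take_append_drop q (tmp.drop q)
        have t3 := List.take_append_drop q (tmp.drop (q*2))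
        have t4 := List.take_append_drop q (tmp.drop (q*3))
        rw [List.drop_drop] at t2 t3 t4
        rw [show q + q = q * 2 by ring] at t2
        rw [show q * 2 + q = q * 3 by ring] at t3
        rw [show q * 3 + q = q * 4 by ring] at t4
        simp only [Nat.mul_zero, Nat.mul_one, List.drop_zero]
        rw [t4, t3, t2, t1]
      have h4 : tmp.drop (q * 4) = [] := by
        apply List.drop_eq_nil_of_le; omega
      rw [hdecomp, h4, e0, e1, e2, e3]
      simp [expectedWolf]
    · exfalso
      rw [if_pos (by exact_mod_cast hmod)] at h
      simp at h
  · rintro ⟨q, rfl⟩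
    have hlen : (expectedWolf q).length = 4 * q := by simp [expectedWolf]; ring
    have hmod : (expectedWolf q).length % 4 = 0 := by omega
    have hdiv : (expectedWolf q).length / 4 = q := by omega
    simp only [check_rule_1]
    rw [hm, hd, hmod, hdiv]
    rw [if_neg (by simp)]
    rw [List.all_eq_true]
    intro i hi
    rw [List.mem_range] at hi
    rw [show ((q : Nat) : Int) * ((i : Nat) : Int) = ((q * i : Nat) : Int) by push_cast; ring,
        show ((q : Nat) : Int) * (((i : Nat) : Int) + 1) = ((q * i : Nat) : Int) + ((q : Nat) : Int) by push_cast; ring,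
        PySem.List.slice_natCast_add, PySem.List.pyRepeat_singleton, wolf_letter i hi,
        expected_slice q i hi]
    simp

-- ===== VERDICT =====
theorem check_rule_1_spec : Claim_equal_check_rule_1 := by
  intro tmp _
  unfold Spec_check_rule_1
  rw [Bool.eq_iff_iff, a_iff, alt_iff]
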